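-- pv_equiv track=rewrite | github.com/posl/comment_recommendation | script/split_gen/4_time/en/197_C/7.py | solve
-- ===== SOURCE A (Python) =====
-- def solve(N, A):
--     from functools import lru_cache
--     @lru_cache(maxsize=None)
--     def f(i, j):
--         if i == j:
--             return 0
--         elif i == j - 1:
--             return A[i] ^ A[j]
--         else:
--             return min(f(i, k) ^ f(k + 1, j) for k in range(i, j))
--     return f(0, N - 1)
-- ===== SOURCE B (Python) =====
-- def solve(N, A):
--     diags = [[0] * N]                      # diags[d][i] == min-xor value of interval [i, i+d]
--     if N >= 2:
--         diags.append([A[i] ^ A[i + 1] for i in range(N - 1)])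
--     for d in range(2, N):
--         diags.append([min(diags[t][i] ^ diags[d - 1 - t][i + t + 1] for t in range(d))
--                       for i in range(N - d)])
--     return diags[N - 1][0]
-- ===== Notes on version B (the rewrite author's own statement) =====
-- stated objective: alternative
-- what changed: Replaced the top-down lru_cache recursion with an explicit bottom-up DP over interval widths: a diagonal-major table diags[d][i] = value of interval [i, i+d] is built row by row from the two base diagonals, with no recursion and no cache.
import Mathlib
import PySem

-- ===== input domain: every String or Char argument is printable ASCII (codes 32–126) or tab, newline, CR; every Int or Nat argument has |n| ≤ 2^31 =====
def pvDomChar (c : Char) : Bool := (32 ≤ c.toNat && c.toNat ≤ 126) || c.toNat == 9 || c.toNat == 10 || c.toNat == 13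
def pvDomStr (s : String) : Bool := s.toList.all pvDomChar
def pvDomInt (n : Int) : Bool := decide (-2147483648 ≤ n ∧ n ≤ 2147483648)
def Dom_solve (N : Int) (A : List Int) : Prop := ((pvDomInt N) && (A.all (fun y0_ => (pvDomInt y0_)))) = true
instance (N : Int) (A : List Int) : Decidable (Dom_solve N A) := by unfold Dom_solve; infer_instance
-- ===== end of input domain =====

-- B replaces the top-down memoized recursion by an explicit bottom-up diagonal table; alternative decomposition, no speed claim.

-- ===== PORT A =====
-- f(i, j): lru_cache memoization is semantically transparent (f is pure), so it is ported as plain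
-- recursion; A[i] is ported as pyGetD, exact because every reachable index lies in range under Pre_.
def fA (A : List Int) (i j : Int) : Int :=
  if i = j then 0
  else if i = j - 1 then PySem.Int.bxor (PySem.List.pyGetD A i 0) (PySem.List.pyGetD A j 0)
  else (PySem.List.min?
          ((PySem.List.pyRange i j 1).attach.map
            (fun k => PySem.Int.bxor (fA A i k.1) (fA A (k.1 + 1) j)))
          (fun x => x)).getD 0
termination_by (j - i).toNat
decreasing_by
  all_goals
    have := (PySem.List.mem_pyRange_one).1 k.2
    omega

def solve (N : Int) (A : List Int) : Int := fA A 0 (N - 1)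

-- ===== PORT B =====
-- one row of the diagonal table: values of all intervals of width d, read from the previous rows
def bRow (diags : List (List Int)) (N d : Int) : List Int :=
  (PySem.List.pyRange 0 (N - d) 1).map (fun i =>
    (PySem.List.min?
      ((PySem.List.pyRange 0 d 1).map (fun t =>
        PySem.Int.bxor (PySem.List.pyGetD (PySem.List.pyGetD diags t []) i 0)
          (PySem.List.pyGetD (PySem.List.pyGetD diags (d - 1 - t) []) (i + t + 1) 0)))
      (fun x => x)).getD 0)

def solve_alt (N : Int) (A : List Int) : Int :=
  let diags0 : List (List Int) := [List.replicate N.toNat 0]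
  let diags1 : List (List Int) :=
    if 2 ≤ N then
      diags0 ++ [(PySem.List.pyRange 0 (N - 1) 1).map
        (fun i => PySem.Int.bxor (PySem.List.pyGetD A i 0) (PySem.List.pyGetD A (i + 1) 0))]
    else diags0
  let diagsF := (PySem.List.pyRange 2 N 1).foldl (fun ds d => ds ++ [bRow ds N d]) diags1
  PySem.List.pyGetD (PySem.List.pyGetD diagsF (N - 1) []) 0 0

-- ===== PRECONDITION & SPEC =====
-- Pre_ excludes exactly the inputs on which the Python A raises: N ≤ 0 (min of an empty generator,
-- ValueError) and 2 ≤ N with N > len(A) (IndexError on A[i]).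
def Pre_solve (N : Int) (A : List Int) : Prop := 1 ≤ N ∧ (2 ≤ N → N ≤ (A.length : Int))
instance (N : Int) (A : List Int) : Decidable (Pre_solve N A) := by unfold Pre_solve; infer_instance
def pvWitness_solve : Int × List Int := (3, [1, 2, 3])

def Spec_solve (N : Int) (A : List Int) (out : Int) : Prop := out = solve_alt N A
instance (N : Int) (A : List Int) (out : Int) : Decidable (Spec_solve N A out) := by unfold Spec_solve; infer_instance

-- ===== CLAIM (what is proved, stated in full; the proofs are below) =====
def Claim_equal_solve : Prop := ∀ (N : Int) (A : List Int), Dom_solve N A → Pre_solve N A → Spec_solve N A (solve N A)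

-- ===== LEMMAS AND PROOFS =====

-- the "intended" row of width d: values fA A i (i+d) for all valid left endpoints i
def specRow (A : List Int) (N : Int) (d : Int) : List Int :=
  (PySem.List.pyRange 0 (N - d) 1).map (fun i => fA A i (i + d))

theorem fA_else (A : List Int) (i j : Int) (h1 : i ≠ j) (h2 : i ≠ j - 1) :
    fA A i j = (PySem.List.min?
      ((PySem.List.pyRange i j 1).map (fun k => PySem.Int.bxor (fA A i k) (fA A (k + 1) j)))
      (fun x => x)).getD 0 := by
  rw [fA]
  simp [h1, h2]

theorem bRow_spec (A : List Int) (N m : Int) (h2 : 2 ≤ m) (_hm : m ≤ N) :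
    bRow ((PySem.List.pyRange 0 m 1).map (specRow A N)) N m = specRow A N m := by
  unfold bRow
  have hlook : ∀ t : Int, 0 ≤ t → t < m →
      PySem.List.pyGetD ((PySem.List.pyRange 0 m 1).map (specRow A N)) t [] = specRow A N t :=
    fun t h0 hlt => PySem.List.pyGetD_map_pyRange_of_nonneg _ m t [] h0 hlt
  conv_rhs => unfold specRow
  apply List.map_congr_left
  intro i hi
  have hi' := (PySem.List.mem_pyRange_one).1 hi
  rw [fA_else A i (i + m) (by omega) (by omega)]
  have hshift : PySem.List.pyRange i (i + m) 1 = (PySem.List.pyRange 0 m 1).map (fun t => i + t) := by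
    rw [PySem.List.pyRange_one 0 m, PySem.List.pyRange_one i (i + m), List.map_map,
        show i + m - i = m by omega, show m - 0 = m by omega]
    simp
  rw [hshift, List.map_map]
  congr 2
  apply List.map_congr_left
  intro t ht
  have ht' := (PySem.List.mem_pyRange_one).1 ht
  simp only [Function.comp_apply]
  rw [hlook t (by omega) (by omega), hlook (m - 1 - t) (by omega) (by omega)]
  unfold specRow
  rw [PySem.List.pyGetD_map_pyRange_of_nonneg _ (N - t) i 0 (by omega) (by omega),
      PySem.List.pyGetD_map_pyRange_of_nonneg _ (N - (m - 1 - t)) (i + t + 1) 0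
        (by omega) (by omega)]
  rw [show i + t + 1 + (m - 1 - t) = i + m by omega]

theorem fold_inv (A : List Int) (N : Int) : ∀ (n : Nat) (m : Int), 2 ≤ m → m ≤ N → (N - m).toNat = n →
    (PySem.List.pyRange m N 1).foldl (fun ds d => ds ++ [bRow ds N d])
      ((PySem.List.pyRange 0 m 1).map (specRow A N))
    = (PySem.List.pyRange 0 N 1).map (specRow A N) := by
  intro n
  induction n with
  | zero =>
    intro m h2 hm hn
    have : m = N := by omega
    subst this
    rw [PySem.List.pyRange_one_eq_nil (le_refl _)]
    simp
  | succ n ih =>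
    intro m h2 hm hn
    have hlt : m < N := by omega
    rw [PySem.List.pyRange_one_cons hlt]
    simp only [List.foldl_cons]
    rw [bRow_spec A N m h2 hm]
    have : (PySem.List.pyRange 0 m 1).map (specRow A N) ++ [specRow A N m]
        = (PySem.List.pyRange 0 (m + 1) 1).map (specRow A N) := by
      rw [PySem.List.pyRange_one_succ_right (by omega : (0:Int) ≤ m)]
      simp
    rw [this]
    exact ih (m + 1) (by omega) (by omega) (by omega)

-- ===== VERDICT (by name: the statement is the Claim_ definition above) =====
theorem diags1_spec (A : List Int) (N : Int) (_hN : 2 ≤ N) :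
    ([List.replicate N.toNat 0] ++
      [(PySem.List.pyRange 0 (N - 1) 1).map
        (fun i => PySem.Int.bxor (PySem.List.pyGetD A i 0) (PySem.List.pyGetD A (i + 1) 0))])
    = (PySem.List.pyRange 0 2 1).map (specRow A N) := by
  have hr : PySem.List.pyRange 0 2 1 = [0, 1] := by decide
  have h0 : specRow A N 0 = List.replicate N.toNat 0 := by
    unfold specRow
    have hc : ∀ i ∈ PySem.List.pyRange 0 (N - 0) 1, fA A i (i + 0) = (fun _ => (0 : Int)) i := by
      intro i _
      rw [show i + 0 = i from by omega, fA]
      simp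
    rw [List.map_congr_left hc, List.map_const', PySem.List.length_pyRange_one,
        show N - 0 - 0 = N from by omega]
  have h1 : specRow A N 1 = (PySem.List.pyRange 0 (N - 1) 1).map
      (fun i => PySem.Int.bxor (PySem.List.pyGetD A i 0) (PySem.List.pyGetD A (i + 1) 0)) := by
    unfold specRow
    apply List.map_congr_left
    intro i _
    rw [fA, if_neg (by omega), if_pos (by omega)]
  rw [hr, List.map_cons, List.map_cons, List.map_nil, h0, h1]
  rfl

theorem solve_spec : Claim_equal_solve := by
  unfold Claim_equal_solve Spec_solve solve solve_alt
  intro N A _ hpre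
  obtain ⟨h1, _⟩ := hpre
  by_cases hN : 2 ≤ N
  · simp only [if_pos hN]
    rw [diags1_spec A N hN, fold_inv A N (N - 2).toNat 2 (by omega) hN (by omega),
        PySem.List.pyGetD_map_pyRange_of_nonneg _ N (N - 1) [] (by omega) (by omega)]
    unfold specRow
    rw [show N - (N - 1) = 1 by omega, show PySem.List.pyRange 0 1 1 = [0] from by decide]
    simp only [List.map_cons, List.map_nil, PySem.List.pyGetD_zero_cons, zero_add]
  · have hN1 : N = 1 := by omega
    subst hN1
    rw [fA]
    simp [PySem.List.pyRange_one_eq_nil (by omega : (1:Int) ≤ 2),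
          PySem.List.pyGetD_zero_cons]
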